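-- pv_equiv track=rewrite | github.com/irinka33/Fiber_clusters_analysis | cell_strict_cluster_new_type_annotation.py | determine_cluster_type
-- ===== SOURCE A (Python) =====
-- from collections import OrderedDict
--
-- MIX_ON = True
--
-- def same_type(point_type,neighbor_type):
--     same = False
--     type = 0
--
--     if point_type == neighbor_type:
--         same = True
--         type = point_type
--
--     else:
--         if  MIX_ON:
--             str_point_type = str(int(point_type))
--             str_neighbor_type = str(int(neighbor_type))
--
--             if (str_point_type in str_neighbor_type) or (str_neighbor_type in str_point_type):
--                 same = True
--                 type = point_type if len(str_point_type)==1 else neighbor_type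
--
--     return (same, type)
--
-- def determine_cluster_type(sorted_neighbors, data):
--     neighbors_type = {0: 0, 1: 0, 2: 0, 3: 0 , 12: 0, 13: 0, 23: 0}
--     confirmed_neighbors = []
--
--     for neighbor in sorted_neighbors:
--         neighbors_type[data[neighbor][4]] += 1
--
--     cluster_type = max(neighbors_type, key=neighbors_type.get)
--     neighbors_type = OrderedDict(sorted(neighbors_type.items(), key=lambda item: item[1], reverse=True))
--
--     for key, value in neighbors_type.items():
--         if len(str(int(key))) == 1:
--             cluster_type = key
--             break
--
--     # checking all neighbors for types conflict
--     for neighbor in sorted_neighbors: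
--         if same_type(cluster_type, data[neighbor][4])[0]:
--             confirmed_neighbors.append(neighbor)
--
--     return (list(confirmed_neighbors), cluster_type)
-- ===== SOURCE B (Python) =====
-- # Simpler: skip the dead max-over-all-keys and the stable reverse sort; pick the
-- # single-digit type directly with max over (0,1,2,3) (ties -> smaller key, which is
-- # exactly A's stable-sort-then-first-single-digit choice), and confirm neighbors by
-- # digit containment, which is what same_type reduces to for a single-digit cluster type.
-- def determine_cluster_type(sorted_neighbors, data):
--     counts = {0: 0, 1: 0, 2: 0, 3: 0, 12: 0, 13: 0, 23: 0}
--     for n in sorted_neighbors: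
--         counts[data[n][4]] += 1
--     cluster_type = max((0, 1, 2, 3), key=counts.get)
--     confirmed_neighbors = [n for n in sorted_neighbors
--                            if str(cluster_type) in str(int(data[n][4]))]
--     return (confirmed_neighbors, cluster_type)
-- ===== Notes on version B (the rewrite author's own statement) =====
-- stated objective: simpler
-- what changed: B keeps the counting loop but replaces A's dead max-over-all-keys, stable reverse sort of the 7 items and first-single-digit scan with a direct max over (0,1,2,3) (ties to the smaller key), and confirms neighbors by digit containment str(cluster_type) in str(type), which same_type reduces to for a single-digit cluster type.
import Mathlib
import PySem

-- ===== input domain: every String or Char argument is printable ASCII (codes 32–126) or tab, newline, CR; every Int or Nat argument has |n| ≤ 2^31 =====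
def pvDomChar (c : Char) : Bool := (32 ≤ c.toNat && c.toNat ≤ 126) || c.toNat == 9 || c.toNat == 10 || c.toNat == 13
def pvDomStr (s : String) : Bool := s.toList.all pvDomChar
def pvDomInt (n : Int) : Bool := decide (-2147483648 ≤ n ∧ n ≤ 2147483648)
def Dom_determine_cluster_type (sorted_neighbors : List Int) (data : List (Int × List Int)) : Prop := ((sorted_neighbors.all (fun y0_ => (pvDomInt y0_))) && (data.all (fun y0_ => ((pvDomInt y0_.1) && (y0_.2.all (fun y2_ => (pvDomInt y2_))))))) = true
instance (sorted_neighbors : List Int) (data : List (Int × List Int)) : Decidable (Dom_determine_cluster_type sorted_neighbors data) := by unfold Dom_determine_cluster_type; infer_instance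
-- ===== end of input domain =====

-- B is simpler: the same counting loop, but the cluster type is picked directly as the
-- max-count key among (0,1,2,3) (ties -> smaller key, exactly A's dead-max + stable
-- reverse sort + first-single-digit scan), and neighbors are confirmed by digit
-- containment, which is what same_type reduces to for a single-digit cluster type.


-- ===== PORT A =====
-- shared data access: data[n] (dict lookup) and data[n][4]
def pvRow (data : List (Int × List Int)) (n : Int) : List Int :=
  ((PySem.Dict.ofList data).get? n).getD []

def pvType (data : List (Int × List Int)) (n : Int) : Int :=
  PySem.List.pyGetD (pvRow data n) 4 0

-- the literal initial dict {0:0, 1:0, 2:0, 3:0, 12:0, 13:0, 23:0}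
def pvInitCounts : PySem.Dict Int Int :=
  PySem.Dict.ofList [(0, 0), (1, 0), (2, 0), (3, 0), (12, 0), (13, 0), (23, 0)]

-- same_type with MIX_ON = True inlined (the module constant is True)
def pvSameType (point_type neighbor_type : Int) : Bool × Int :=
  if point_type == neighbor_type then (true, point_type)
  else
    let sp := PySem.Int.toStr point_type
    let sn := PySem.Int.toStr neighbor_type
    if PySem.Str.isIn sp sn || PySem.Str.isIn sn sp then
      (true, if PySem.Str.len sp = 1 then point_type else neighbor_type)
    else (false, 0)

-- the 'for key, value in …: if len(str(int(key))) == 1: cluster_type = key; break' loop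
def pvFirstSingle : List (Int × Int) → Int → Int
  | [], ct => ct
  | (k, _) :: rest, ct =>
    if PySem.Str.len (PySem.Int.toStr k) = 1 then k else pvFirstSingle rest ct

def determine_cluster_type (sorted_neighbors : List Int) (data : List (Int × List Int)) : List Int × Int :=
  let counts := sorted_neighbors.foldl (fun d n => d.modify (pvType data n) 0 (· + 1)) pvInitCounts
  let ct0 := PySem.List.maxD counts.keys (fun k => counts.getD k 0) 0
  let sortedItems := PySem.List.sorted counts.items (fun p => p.2) true
  let cluster_type := pvFirstSingle sortedItems ct0
  let confirmed := sorted_neighbors.foldl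
    (fun acc n => if (pvSameType cluster_type (pvType data n)).1 then acc ++ [n] else acc) []
  (confirmed, cluster_type)

-- ===== PORT B =====
def determine_cluster_type_alt (sorted_neighbors : List Int) (data : List (Int × List Int)) : List Int × Int :=
  let counts := sorted_neighbors.foldl (fun d n => d.modify (pvType data n) 0 (· + 1)) pvInitCounts
  let cluster_type := PySem.List.maxD [0, 1, 2, 3] (fun k => counts.getD k 0) 0
  let confirmed := sorted_neighbors.filter
    (fun n => PySem.Str.isIn (PySem.Int.toStr cluster_type) (PySem.Int.toStr (pvType data n)))
  (confirmed, cluster_type)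

-- ===== PRECONDITION & SPEC =====
-- Pre_: every neighbor is a key of data, its row has an index 4, and the type stored
-- there is one of the seven table keys — exactly the inputs on which A raises no
-- KeyError/IndexError (elsewhere A raises and returns nothing).
def Pre_determine_cluster_type (sorted_neighbors : List Int) (data : List (Int × List Int)) : Prop :=
  ∀ n ∈ sorted_neighbors, (PySem.Dict.ofList data).contains n = true ∧
    5 ≤ (pvRow data n).length ∧ pvType data n ∈ ([0, 1, 2, 3, 12, 13, 23] : List Int)
instance (sorted_neighbors : List Int) (data : List (Int × List Int)) : Decidable (Pre_determine_cluster_type sorted_neighbors data) := by unfold Pre_determine_cluster_type; infer_instance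

def pvWitness_determine_cluster_type : List Int × (List (Int × List Int)) :=
  ([0, 1], [(0, [0, 0, 0, 0, 1]), (1, [9, 9, 9, 9, 12])])

def Spec_determine_cluster_type (sorted_neighbors : List Int) (data : List (Int × List Int)) (out : List Int × Int) : Prop := out = determine_cluster_type_alt sorted_neighbors data
instance (sorted_neighbors : List Int) (data : List (Int × List Int)) (out : List Int × Int) : Decidable (Spec_determine_cluster_type sorted_neighbors data out) := by unfold Spec_determine_cluster_type; infer_instance

-- ===== CLAIM (what is proved, stated in full; the proofs are below) =====
def Claim_equal_determine_cluster_type : Prop := ∀ (sorted_neighbors : List Int) (data : List (Int × List Int)), Dom_determine_cluster_type sorted_neighbors data → Pre_determine_cluster_type sorted_neighbors data → Spec_determine_cluster_type sorted_neighbors data (determine_cluster_type sorted_neighbors data)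

-- ===== LEMMAS AND PROOFS =====

-- the single-digit test used by A's scan, as a predicate on dict items
def pvSingle (q : Int × Int) : Bool := decide (PySem.Str.len (PySem.Int.toStr q.1) = 1)

-- the two defining equations of PySem.List.insertBy, for unfolding on literal lists
theorem pv_insertBy_nil (b : Int × Int → Int × Int → Bool) (x : Int × Int) :
    PySem.List.insertBy b x [] = [x] := rfl

theorem pv_insertBy_cons (b : Int × Int → Int × Int → Bool) (x y : Int × Int)
    (ys : List (Int × Int)) :
    PySem.List.insertBy b x (y :: ys)
      = if b x y then x :: y :: ys else y :: PySem.List.insertBy b x ys := rfl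

-- insertBy (descending by .2) preserves descending pairwise order
theorem pv_insertBy_pairwise (x : Int × Int) (ys : List (Int × Int))
    (h : ys.Pairwise (fun a b => b.2 ≤ a.2)) :
    (PySem.List.insertBy (fun a b => decide (b.2 < a.2)) x ys).Pairwise (fun a b => b.2 ≤ a.2) := by
  induction ys with
  | nil => simp [PySem.List.insertBy]
  | cons y ys ih =>
    rcases List.pairwise_cons.1 h with ⟨hy, hys⟩
    by_cases hb : y.2 < x.2
    · rw [show PySem.List.insertBy (fun a b => decide (b.2 < a.2)) x (y :: ys) = x :: y :: ys by
        simp [PySem.List.insertBy, hb]]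
      refine List.pairwise_cons.2 ⟨?_, h⟩
      intro z hz
      rcases List.mem_cons.1 hz with rfl | hz
      · exact le_of_lt hb
      · exact le_trans (hy z hz) (le_of_lt hb)
    · rw [show PySem.List.insertBy (fun a b => decide (b.2 < a.2)) x (y :: ys) =
          y :: PySem.List.insertBy (fun a b => decide (b.2 < a.2)) x ys by
        simp [PySem.List.insertBy, hb]]
      refine List.pairwise_cons.2 ⟨?_, ih hys⟩
      intro z hz
      rw [PySem.List.mem_insertBy] at hz
      rcases hz with rfl | hz
      · exact le_of_not_gt (by exact_mod_cast hb)
      · exact hy z hz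

-- filter commutes with one descending insertion into a descending list
theorem pv_filter_insertBy (p : Int × Int → Bool) (x : Int × Int) (ys : List (Int × Int))
    (h : ys.Pairwise (fun a b => b.2 ≤ a.2)) :
    (PySem.List.insertBy (fun a b => decide (b.2 < a.2)) x ys).filter p
      = if p x then PySem.List.insertBy (fun a b => decide (b.2 < a.2)) x (ys.filter p)
        else ys.filter p := by
  induction ys with
  | nil => by_cases hp : p x <;> simp [PySem.List.insertBy, hp]
  | cons y ys ih =>
    rcases List.pairwise_cons.1 h with ⟨hy, hys⟩
    by_cases hb : y.2 < x.2
    · rw [show PySem.List.insertBy (fun a b => decide (b.2 < a.2)) x (y :: ys) = x :: y :: ys by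
        simp [PySem.List.insertBy, hb]]
      by_cases hp : p x
      · simp only [List.filter_cons, if_pos, hp]
        by_cases hpy : p y
        · have : PySem.List.insertBy (fun a b => decide (b.2 < a.2)) x (y :: ys.filter p) =
              x :: y :: ys.filter p := by simp [PySem.List.insertBy, hb]
          simp [hpy, this]
        · -- y is filtered out; x still lands in front: everything in ys is ≤ y.2 < x.2
          have hfront : PySem.List.insertBy (fun a b => decide (b.2 < a.2)) x (ys.filter p) =
              x :: ys.filter p := by
            cases hfy : ys.filter p with
            | nil => simp [PySem.List.insertBy]
            | cons z zs =>
              have hz : z ∈ ys := List.mem_of_mem_filter (hfy ▸ List.mem_cons_self)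
              have : z.2 < x.2 := lt_of_le_of_lt (hy z hz) hb
              simp [PySem.List.insertBy, this]
          simp [hpy, hfront]
      · simp [List.filter_cons, hp]
    · rw [show PySem.List.insertBy (fun a b => decide (b.2 < a.2)) x (y :: ys) =
          y :: PySem.List.insertBy (fun a b => decide (b.2 < a.2)) x ys by
        simp [PySem.List.insertBy, hb]]
      by_cases hpy : p y
      · by_cases hp : p x
        · have : PySem.List.insertBy (fun a b => decide (b.2 < a.2)) x (y :: ys.filter p) =
              y :: PySem.List.insertBy (fun a b => decide (b.2 < a.2)) x (ys.filter p) := by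
            simp [PySem.List.insertBy, hb]
          simp [List.filter_cons, hpy, hp, ih hys, this]
        · simp [List.filter_cons, hpy, hp, ih hys]
      · simp [List.filter_cons, hpy, ih hys]

-- filter commutes with the insertion-sort fold
theorem pv_filter_foldl (p : Int × Int → Bool) (l : List (Int × Int)) :
    ∀ acc : List (Int × Int), acc.Pairwise (fun a b => b.2 ≤ a.2) →
    (l.foldl (fun a x => PySem.List.insertBy (fun a b => decide (b.2 < a.2)) x a) acc).filter p
      = (l.filter p).foldl (fun a x => PySem.List.insertBy (fun a b => decide (b.2 < a.2)) x a)
        (acc.filter p) := by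
  induction l with
  | nil => intro acc _; simp
  | cons x l ih =>
    intro acc hacc
    simp only [List.foldl_cons, List.filter_cons]
    rw [ih _ (pv_insertBy_pairwise x acc hacc), pv_filter_insertBy p x acc hacc]
    by_cases hp : p x <;> simp [hp]

-- filter commutes with the stable descending sort
theorem pv_filter_sorted (p : Int × Int → Bool) (l : List (Int × Int)) :
    (PySem.List.sorted l (fun q => q.2) true).filter p
      = PySem.List.sorted (l.filter p) (fun q => q.2) true := by
  have := pv_filter_foldl p l [] (by simp)
  simpa [PySem.List.sorted] using this

-- A's break-scan is the head of the single-digit-filtered list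
theorem pv_firstSingle_eq (l : List (Int × Int)) (z : Int) :
    pvFirstSingle l z = match l.filter pvSingle with
      | [] => z
      | q :: _ => q.1 := by
  induction l with
  | nil => simp [pvFirstSingle]
  | cons q l ih =>
    obtain ⟨k, v⟩ := q
    by_cases hk : (PySem.Int.toChars k).length = 1 <;>
      simp [pvFirstSingle, List.filter_cons, pvSingle, PySem.Str.len, hk, ih]

-- the selection A performs on the seven counts equals B's max over (0, 1, 2, 3)
set_option maxHeartbeats 1000000 in
theorem pv_sel (g : Int → Int) (z : Int) :
    pvFirstSingle (PySem.List.sorted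
        [((0 : Int), g 0), (1, g 1), (2, g 2), (3, g 3), (12, g 12), (13, g 13), (23, g 23)]
        (fun q => q.2) true) z
      = PySem.List.maxD [(0 : Int), 1, 2, 3] g 0 := by
  rw [pv_firstSingle_eq, pv_filter_sorted pvSingle]
  have hf : List.filter pvSingle
      [((0 : Int), g 0), (1, g 1), (2, g 2), (3, g 3), (12, g 12), (13, g 13), (23, g 23)]
      = [((0 : Int), g 0), (1, g 1), (2, g 2), (3, g 3)] := by
    have t0 : ∀ v : Int, pvSingle (0, v) = true := fun v => by simp [pvSingle, PySem.Str.len]; decide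
    have t1 : ∀ v : Int, pvSingle (1, v) = true := fun v => by simp [pvSingle, PySem.Str.len]; decide
    have t2 : ∀ v : Int, pvSingle (2, v) = true := fun v => by simp [pvSingle, PySem.Str.len]; decide
    have t3 : ∀ v : Int, pvSingle (3, v) = true := fun v => by simp [pvSingle, PySem.Str.len]; decide
    have t12 : ∀ v : Int, pvSingle (12, v) = false := fun v => by simp [pvSingle, PySem.Str.len]; decide
    have t13 : ∀ v : Int, pvSingle (13, v) = false := fun v => by simp [pvSingle, PySem.Str.len]; decide
    have t23 : ∀ v : Int, pvSingle (23, v) = false := fun v => by simp [pvSingle, PySem.Str.len]; decide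
    simp [t0, t1, t2, t3, t12, t13, t23]
  rw [hf]
  simp only [PySem.List.sorted, PySem.List.maxD, PySem.List.max?, List.foldl,
    pv_insertBy_nil, pv_insertBy_cons]
  repeat' (first
    | omega
    | (split_ifs <;>
        (try simp_all [pv_insertBy_nil, pv_insertBy_cons,
          apply_ite (fun o : Option Int => Option.getD o 0)])))

-- for a single-digit cluster type and a table type, same_type is digit containment
theorem pv_cond (ct t : Int) (hct : ct ∈ ([0, 1, 2, 3] : List Int))
    (ht : t ∈ ([0, 1, 2, 3, 12, 13, 23] : List Int)) :
    (pvSameType ct t).1 = PySem.Str.isIn (PySem.Int.toStr ct) (PySem.Int.toStr t) := by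
  fin_cases hct <;> fin_cases ht <;> decide

-- ===== VERDICT (by name: the statement is the Claim_ definition above) =====
theorem determine_cluster_type_spec : Claim_equal_determine_cluster_type := by
  intro sn data _ hpre
  unfold Spec_determine_cluster_type
  simp only [determine_cluster_type, determine_cluster_type_alt]
  set counts := sn.foldl (fun d n => d.modify (pvType data n) 0 (· + 1)) pvInitCounts with hc
  have hmap : counts = (sn.map (pvType data)).foldl
      (fun d x => d.modify x 0 (· + 1)) pvInitCounts := by
    rw [hc, List.foldl_map]
  have hmem : ∀ t ∈ sn.map (pvType data), t ∈ ([0, 1, 2, 3, 12, 13, 23] : List Int) := by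
    intro t ht
    rcases List.mem_map.1 ht with ⟨n, hn, rfl⟩
    exact (hpre n hn).2.2
  have hkeys : counts.keys = [0, 1, 2, 3, 12, 13, 23] := by
    rw [hmap, PySem.Dict.keys_foldl_modify]
    rw [PySem.Set.update_eq_append_filter]
    have hfe : List.filter (fun y => !PySem.Set.contains (PySem.Dict.keys pvInitCounts) y)
        (PySem.Set.ofList (sn.map (pvType data))) = [] := by
      rw [List.filter_eq_nil_iff]
      intro y hy
      have hy' := (PySem.Set.mem_ofList _ _).1 hy
      have hym := hmem y hy'
      fin_cases hym <;> decide
    rw [hfe]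
    rfl
  have hnd : counts.keys.Nodup := by
    rw [hkeys]; decide
  have hitems : counts.items =
      [(0, counts.getD 0 0), (1, counts.getD 1 0), (2, counts.getD 2 0), (3, counts.getD 3 0),
       (12, counts.getD 12 0), (13, counts.getD 13 0), (23, counts.getD 23 0)] := by
    rw [PySem.Dict.items_eq_map_keys counts hnd 0, hkeys]
    rfl
  have hsel : ∀ z, pvFirstSingle
        (PySem.List.sorted counts.items (fun p => p.2) true) z
      = PySem.List.maxD [0, 1, 2, 3] (fun k => counts.getD k 0) 0 := by
    intro z
    rw [hitems]
    exact pv_sel (fun k => counts.getD k 0) z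
  rw [hsel]
  have hctmem : PySem.List.maxD [(0:Int), 1, 2, 3] (fun k => counts.getD k 0) 0 ∈
      ([0, 1, 2, 3] : List Int) := by
    rcases h : PySem.List.max? [(0:Int), 1, 2, 3] (fun k => counts.getD k 0) with _ | m
    · exact absurd ((PySem.List.max?_eq_none_iff _ _).1 h) (by decide)
    · have := PySem.List.max?_mem h
      simpa [PySem.List.maxD, h] using this
  refine Prod.ext ?_ rfl
  simp only
  rw [show (fun acc n => if (pvSameType (PySem.List.maxD [0,1,2,3] (fun k => counts.getD k 0) 0) (pvType data n)).1 = true then acc ++ [n] else acc)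
      = (fun acc n => if (fun n => (pvSameType (PySem.List.maxD [0,1,2,3] (fun k => counts.getD k 0) 0) (pvType data n)).1) n = true then acc ++ [(fun n : Int => n) n] else acc) from rfl]
  rw [PySem.List.foldl_append_if]
  simp only [List.map_id_fun', List.nil_append]
  apply List.filter_congr
  intro n hn
  exact pv_cond _ _ hctmem (hpre n hn).2.2
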